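-- pv_equiv track=rewrite | github.com/YBiryukov/kaggle-environments | kaggle_environments/envs/sds/seed_planter/field.py | get_planting_sites
-- ===== SOURCE A (Python) =====
-- def get_planting_sites(sim_conf):
--     """ get planting sites of the field """
--     # apply custom configuration to the planting site
--     if "seeds_to_plant" in sim_conf:
--         seeds_to_plant = sim_conf["seeds_to_plant"]
--     else:
--         seeds_to_plant = 10
--     planting_sites = []
--     x_offset = 100
--     y_offset = 100
--     x_step = 40
--     y_step = 60
--     index = 0
--     # 10x5 grid of planting sites
--     for i in range(5):
--         this_row_x = x_offset
--         for j in range(10):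
--             planting_sites.append({
--                 "index": index,
--                 "drone_index": None,
--                 "seeds_to_plant": seeds_to_plant,
--                 "size": 15,
--                 "x": this_row_x,
--                 "y": y_offset
--             })
--             index += 1
--             this_row_x += x_step
--         y_offset += y_step
--     return planting_sites
-- ===== SOURCE B (Python) =====
-- def get_planting_sites(sim_conf):
--     """ get planting sites of the field """
--     seeds_to_plant = sim_conf["seeds_to_plant"] if "seeds_to_plant" in sim_conf else 10
--     return [{
--         "index": index,
--         "drone_index": None,
--         "seeds_to_plant": seeds_to_plant,
--         "size": 15,
--         "x": 100 + (index % 10) * 40,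
--         "y": 100 + (index // 10) * 60
--     } for index in range(50)]
-- ===== Notes on version B (the rewrite author's own statement) =====
-- stated objective: simpler
-- what changed: Replaced the nested 5x10 loops with mutable x/y/index accumulators by a single comprehension over range(50) that computes x and y in closed form from index via divmod.
import Mathlib
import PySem

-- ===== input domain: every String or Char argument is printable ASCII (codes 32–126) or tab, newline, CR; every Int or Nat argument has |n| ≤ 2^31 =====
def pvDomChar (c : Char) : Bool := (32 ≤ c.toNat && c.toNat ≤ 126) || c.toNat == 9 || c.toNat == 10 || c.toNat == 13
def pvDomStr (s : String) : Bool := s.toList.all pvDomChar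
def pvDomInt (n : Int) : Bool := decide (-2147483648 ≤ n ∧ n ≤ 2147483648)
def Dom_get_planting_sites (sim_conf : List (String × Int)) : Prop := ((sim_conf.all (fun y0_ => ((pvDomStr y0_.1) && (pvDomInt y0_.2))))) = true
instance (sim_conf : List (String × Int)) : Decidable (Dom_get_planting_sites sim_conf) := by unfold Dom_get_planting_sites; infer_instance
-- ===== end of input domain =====

-- B replaces A's nested 5x10 loops with running x/y/index accumulators by a single
-- comprehension over range(50) computing x and y in closed form via divmod (simpler).

-- ===== PORT A =====
-- one inner-loop body: append the dict, bump index and this_row_x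
def pvA_inner (st : List (List (String × Option Int)) × Int × Int) (seeds y_offset : Int) :
    List (List (String × Option Int)) × Int × Int :=
  let (sites, this_row_x, index) := st
  (sites ++ [[("index", some index), ("drone_index", none), ("seeds_to_plant", some seeds),
              ("size", some 15), ("x", some this_row_x), ("y", some y_offset)]],
   this_row_x + 40, index + 1)

def get_planting_sites (sim_conf : List (String × Int)) : List (List (String × Option Int)) :=
  let seeds_to_plant : Int :=
    match sim_conf.find? (fun p => p.1 == "seeds_to_plant") with
    | some p => p.2
    | none => 10
  let st :=
    (PySem.List.pyRange 0 5 1).foldl (fun (st : List (List (String × Option Int)) × Int × Int) _ =>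
      let (sites, y_offset, index) := st
      let inner := (PySem.List.pyRange 0 10 1).foldl
        (fun st2 _ => pvA_inner st2 seeds_to_plant y_offset) (sites, (100 : Int), index)
      (inner.1, y_offset + 60, inner.2.2)) ([], (100 : Int), (0 : Int))
  st.1

-- ===== PORT B =====
def get_planting_sites_alt (sim_conf : List (String × Int)) : List (List (String × Option Int)) :=
  let seeds_to_plant : Int :=
    match sim_conf.find? (fun p => p.1 == "seeds_to_plant") with
    | some p => p.2
    | none => 10
  (PySem.List.pyRange 0 50 1).map (fun index =>
    [("index", some index), ("drone_index", none), ("seeds_to_plant", some seeds_to_plant),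
     ("size", some 15), ("x", some (100 + (PySem.Int.mod index 10) * 40)),
     ("y", some (100 + (PySem.Int.floordiv index 10) * 60))])

-- ===== PRECONDITION & SPEC =====
def Spec_get_planting_sites (sim_conf : List (String × Int)) (out : List (List (String × Option Int))) : Prop := out = get_planting_sites_alt sim_conf
instance (sim_conf : List (String × Int)) (out : List (List (String × Option Int))) : Decidable (Spec_get_planting_sites sim_conf out) := by unfold Spec_get_planting_sites; infer_instance

-- ===== CLAIM (what is proved, stated in full; the proofs are below) =====
def Claim_equal_get_planting_sites : Prop := ∀ (sim_conf : List (String × Int)), Dom_get_planting_sites sim_conf → Spec_get_planting_sites sim_conf (get_planting_sites sim_conf)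

-- ===== LEMMAS AND PROOFS =====

-- ===== VERDICT (by name: the statement is the Claim_ definition above) =====
set_option maxHeartbeats 1000000 in
lemma pv_core_eq (s : Int) :
    (let st :=
      (PySem.List.pyRange 0 5 1).foldl (fun (st : List (List (String × Option Int)) × Int × Int) _ =>
        let (sites, y_offset, index) := st
        let inner := (PySem.List.pyRange 0 10 1).foldl
          (fun st2 _ => pvA_inner st2 s y_offset) (sites, (100 : Int), index)
        (inner.1, y_offset + 60, inner.2.2)) ([], (100 : Int), (0 : Int))
     st.1) =
    (PySem.List.pyRange 0 50 1).map (fun index =>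
      [("index", some index), ("drone_index", none), ("seeds_to_plant", some s),
       ("size", some 15), ("x", some (100 + (PySem.Int.mod index 10) * 40)),
       ("y", some (100 + (PySem.Int.floordiv index 10) * 60))]) := by
  simp only [show PySem.List.pyRange 0 5 1 = [0,1,2,3,4] from by decide,
             show PySem.List.pyRange 0 10 1 = [0,1,2,3,4,5,6,7,8,9] from by decide,
             show PySem.List.pyRange 0 50 1 = [0,1,2,3,4,5,6,7,8,9,10,11,12,13,14,15,16,17,18,19,20,21,22,23,24,25,26,27,28,29,30,31,32,33,34,35,36,37,38,39,40,41,42,43,44,45,46,47,48,49] from by decide,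
             List.foldl_cons, List.foldl_nil, List.map_cons, List.map_nil, pvA_inner]
  norm_num [PySem.Int.mod, PySem.Int.floordiv, Int.emod, Int.fmod, Int.fdiv]

-- ===== VERDICT (by name: the statement is the Claim_ definition above) =====
theorem get_planting_sites_spec : Claim_equal_get_planting_sites := by
  intro sim_conf _
  unfold Spec_get_planting_sites get_planting_sites get_planting_sites_alt
  exact pv_core_eq _
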